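-- pv_equiv track=rewrite | github.com/akorpioj/GenePanelCombine | app/version_control_service.py | _parse_tags_from_path
-- ===== SOURCE A (Python) =====
-- from typing import Optional, Dict, List, Any, Tuple
--
-- def _parse_tags_from_path(storage_path: str) -> List[Dict[str, str]]:
--     """Parse tag information from storage path"""
--     tags = []
--     parts = storage_path.split("|")
--
--     for part in parts:
--         if part.startswith("tag:"):
--             try:
--                 _, tag_name, tag_type = part.split(":", 2)
--                 tags.append({"name": tag_name, "type": tag_type})
--             except ValueError:
--                 continue
--
--     return tags
-- ===== SOURCE B (Python) =====
-- def _parse_tags_from_path(storage_path):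
--     """Parse tag information from storage path (incremental partition scan, no exceptions)."""
--     tags = []
--     rest = storage_path
--     while True:
--         part, sep, rest2 = rest.partition("|")
--         if part.startswith("tag:"):
--             name, sep2, typ = part[4:].partition(":")
--             if sep2:
--                 tags.append({"name": name, "type": typ})
--         if not sep:
--             return tags
--         rest = rest2
-- ===== Notes on version B (the rewrite author's own statement) =====
-- stated objective: alternative
-- what changed: Replaces split-into-a-parts-list plus a loop with try/except tuple-unpacking of split(':',2) by a single incremental str.partition scan that never builds the parts list and never raises.
import Mathlib
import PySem

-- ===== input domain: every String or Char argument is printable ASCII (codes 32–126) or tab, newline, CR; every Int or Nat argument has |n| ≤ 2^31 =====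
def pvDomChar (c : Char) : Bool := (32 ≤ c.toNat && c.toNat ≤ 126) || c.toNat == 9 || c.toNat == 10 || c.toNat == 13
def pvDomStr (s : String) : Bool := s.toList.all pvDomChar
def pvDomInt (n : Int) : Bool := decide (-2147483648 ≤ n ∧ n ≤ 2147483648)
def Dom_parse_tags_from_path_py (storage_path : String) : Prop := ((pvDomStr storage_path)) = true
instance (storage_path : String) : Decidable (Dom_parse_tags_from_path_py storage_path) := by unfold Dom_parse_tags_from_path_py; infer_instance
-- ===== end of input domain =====

-- B replaces A's split-into-a-list + loop + try/except by an incremental str.partition scan; same values, same cost (objective: alternative).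

-- ===== PORT A =====
-- A: parts = storage_path.split("|"); for each part: if part.startswith("tag:"):
--    try: _, name, type = part.split(":", 2); append — except ValueError: continue.
def parse_tags_from_path_py (storage_path : String) : List (List (String × String)) :=
  let parts := PySem.Chars.splitOn storage_path.toList "|".toList
  parts.foldl (fun tags part =>
    if PySem.Chars.startswith part "tag:".toList then
      match PySem.Chars.splitMax? part ":".toList 2 with
      | some [_, tag_name, tag_type] =>
          tags ++ [[("name", String.ofList tag_name), ("type", String.ofList tag_type)]]
      | _ => tags
    else tags) []

-- ===== PORT B =====
-- B's loop: part, sep, rest2 = rest.partition("|");  per part: name, sep2, typ = part[4:].partition(":")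
def parse_tags_from_path_py_alt_go (cs : List Char) : List (List (String × String)) :=
  let part := cs.takeWhile (fun c => !(c == '|'))
  let here :=
    if PySem.Chars.startswith part "tag:".toList then
      let body := part.drop 4
      match body.dropWhile (fun c => !(c == ':')) with
      | _ :: typ =>
          [[("name", String.ofList (body.takeWhile (fun c => !(c == ':')))), ("type", String.ofList typ)]]
      | [] => []
    else []
  match h : cs.dropWhile (fun c => !(c == '|')) with
  | [] => here
  | _ :: rest => here ++ parse_tags_from_path_py_alt_go rest
termination_by cs.length
decreasing_by
  have hle := List.length_dropWhile_le (fun c => !(c == '|')) cs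
  rw [h] at hle; simp at hle; omega

def parse_tags_from_path_py_alt (storage_path : String) : List (List (String × String)) :=
  parse_tags_from_path_py_alt_go storage_path.toList

-- ===== PRECONDITION & SPEC =====
def Spec_parse_tags_from_path_py (storage_path : String) (out : List (List (String × String))) : Prop := out = parse_tags_from_path_py_alt storage_path
instance (storage_path : String) (out : List (List (String × String))) : Decidable (Spec_parse_tags_from_path_py storage_path out) := by unfold Spec_parse_tags_from_path_py; infer_instance

-- ===== CLAIM (what is proved, stated in full; the proofs are below) =====
def Claim_equal_parse_tags_from_path_py : Prop := ∀ (storage_path : String), Dom_parse_tags_from_path_py storage_path → Spec_parse_tags_from_path_py storage_path (parse_tags_from_path_py storage_path)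

-- ===== LEMMAS AND PROOFS =====

-- clean recursive characterisation of split on "|"
def psplit (cs : List Char) : List (List Char) :=
  cs.takeWhile (fun c => !(c == '|')) ::
    (match h : cs.dropWhile (fun c => !(c == '|')) with
     | [] => []
     | _ :: r => psplit r)
termination_by cs.length
decreasing_by
  have hle := List.length_dropWhile_le (fun c => !(c == '|')) cs
  rw [h] at hle; simp at hle; omega

-- what A appends for one part
def emitA (part : List Char) : List (List (String × String)) :=
  if PySem.Chars.startswith part "tag:".toList then
    match PySem.Chars.splitMax? part ":".toList 2 with
    | some [_, tag_name, tag_type] =>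
        [[("name", String.ofList tag_name), ("type", String.ofList tag_type)]]
    | _ => []
  else []

-- what B appends for one part
def emitB (part : List Char) : List (List (String × String)) :=
  if PySem.Chars.startswith part "tag:".toList then
    let body := part.drop 4
    match body.dropWhile (fun c => !(c == ':')) with
    | _ :: typ =>
        [[("name", String.ofList (body.takeWhile (fun c => !(c == ':')))), ("type", String.ofList typ)]]
    | [] => []
  else []

theorem splitOn_go_nil (fuel : Nat) (cur : List Char) (accs : List (List Char)) :
    PySem.Chars.splitOn.go ['|'] fuel [] cur accs = (cur.reverse :: accs).reverse := by
  cases fuel <;> simp [PySem.Chars.splitOn.go]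

theorem splitOn_go_cons (fuel : Nat) (c : Char) (l cur : List Char) (accs : List (List Char)) :
    PySem.Chars.splitOn.go ['|'] (fuel + 1) (c :: l) cur accs =
      if c = '|' then PySem.Chars.splitOn.go ['|'] fuel l [] (cur.reverse :: accs)
      else PySem.Chars.splitOn.go ['|'] fuel l (c :: cur) accs := by
  by_cases h : c = '|'
  · subst h; rw [PySem.Chars.splitOn.go]; simp [List.isPrefixOf]
  · rw [PySem.Chars.splitOn.go, if_neg h]
    have : (['|'].isPrefixOf (c :: l)) = false := by
      simp [List.isPrefixOf]; exact fun h' => absurd h'.symm h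
    simp [this]

theorem psplit_unfold (cs : List Char) : psplit cs =
    cs.takeWhile (fun c => !(c == '|')) ::
      (match cs.dropWhile (fun c => !(c == '|')) with | [] => [] | _ :: r => psplit r) := by
  rw [psplit]
  congr 1
  split <;> rename_i hd <;> simp [hd]

theorem splitOn_go_spec (fuel : Nat) : ∀ (l cur : List Char) (accs : List (List Char)),
    l.length < fuel →
    PySem.Chars.splitOn.go ['|'] fuel l cur accs =
      accs.reverse ++ (cur.reverse ++ l.takeWhile (fun c => !(c == '|'))) ::
        (match l.dropWhile (fun c => !(c == '|')) with | [] => [] | _ :: r => psplit r) := by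
  induction fuel with
  | zero => intro l cur accs h; omega
  | succ f ih =>
    intro l cur accs h
    cases l with
    | nil => simp [splitOn_go_nil]
    | cons c rest =>
      rw [splitOn_go_cons]
      by_cases hc : c = '|'
      · subst hc
        rw [if_pos rfl, ih rest [] _ (by simpa using Nat.lt_of_succ_lt_succ h)]
        have hd : List.dropWhile (fun c => !(c == '|')) ('|'::rest) = '|'::rest := by simp
        have ht : List.takeWhile (fun c => !(c == '|')) ('|'::rest) = [] := by simp
        rw [ht, hd]
        conv_rhs => rw [show (match ('|'::rest : List Char) with
          | [] => ([] : List (List Char)) | _ :: r => psplit r) = psplit rest from rfl]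
        rw [psplit_unfold rest]
        simp
      · rw [if_neg hc, ih rest (c :: cur) accs (by simpa using Nat.lt_of_succ_lt_succ h)]
        simp [hc]

theorem splitOn_eq_psplit (cs : List Char) :
    PySem.Chars.splitOn cs ['|'] = psplit cs := by
  rw [PySem.Chars.splitOn, splitOn_go_spec (cs.length + 1) cs [] [] (by omega)]
  rw [psplit_unfold]; simp

theorem goMax0 (fuel : Nat) (l cur : List Char) (acc : List (List Char)) :
    PySem.Chars.splitOnMax.go [':'] fuel 0 l cur acc = ((cur.reverse ++ l) :: acc).reverse := by
  cases fuel with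
  | zero => rw [PySem.Chars.splitOnMax.go]
  | succ f => cases l with
    | nil => rw [PySem.Chars.splitOnMax.go]; simp; omega
    | cons c r => rw [PySem.Chars.splitOnMax.go]; simp

theorem goMax_cons (fuel m : Nat) (hm : m ≠ 0) (c : Char) (l cur : List Char) (acc : List (List Char)) :
    PySem.Chars.splitOnMax.go [':'] (fuel + 1) m (c :: l) cur acc =
      if c = ':' then PySem.Chars.splitOnMax.go [':'] fuel (m - 1) l [] (cur.reverse :: acc)
      else PySem.Chars.splitOnMax.go [':'] fuel m l (c :: cur) acc := by
  by_cases h : c = ':'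
  · subst h; rw [PySem.Chars.splitOnMax.go]; simp [List.isPrefixOf, hm]
  · rw [PySem.Chars.splitOnMax.go, if_neg h, if_neg hm]
    have : ([':'].isPrefixOf (c :: l)) = false := by
      simp [List.isPrefixOf]; exact fun h' => absurd h'.symm h
    simp [this]

theorem goMax1 (fuel : Nat) : ∀ (l cur : List Char) (acc : List (List Char)),
    l.length < fuel →
    PySem.Chars.splitOnMax.go [':'] fuel 1 l cur acc =
      acc.reverse ++ (match l.dropWhile (fun c => !(c == ':')) with
        | [] => [cur.reverse ++ l]
        | _ :: r => [cur.reverse ++ l.takeWhile (fun c => !(c == ':')), r]) := by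
  induction fuel with
  | zero => intro l cur acc h; omega
  | succ f ih =>
    intro l cur acc h
    cases l with
    | nil => rw [PySem.Chars.splitOnMax.go]; simp; omega
    | cons c rest =>
      rw [goMax_cons f 1 (by omega)]
      by_cases hc : c = ':'
      · subst hc
        rw [if_pos rfl, goMax0]
        simp
      · rw [if_neg hc, ih rest (c :: cur) acc (by simpa using Nat.lt_of_succ_lt_succ h)]
        have hd : List.dropWhile (fun c => !(c == ':')) (c::rest) = List.dropWhile (fun c => !(c == ':')) rest := by simp [hc]
        have ht : List.takeWhile (fun c => !(c == ':')) (c::rest) = c :: List.takeWhile (fun c => !(c == ':')) rest := by simp [hc]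
        rw [hd, ht]
        cases List.dropWhile (fun c => !(c == ':')) rest <;> simp

theorem tagSplit (body : List Char) :
    PySem.Chars.splitOnMax ('t' :: 'a' :: 'g' :: ':' :: body) [':'] 2 =
      (match body.dropWhile (fun c => !(c == ':')) with
        | [] => [['t','a','g'], body]
        | _ :: r => [['t','a','g'], body.takeWhile (fun c => !(c == ':')), r]) := by
  rw [PySem.Chars.splitOnMax]
  norm_num
  rw [show (Int.toNat 2) = 2 from rfl]
  rw [goMax_cons _ 2 (by omega), if_neg (by decide)]
  rw [goMax_cons _ 2 (by omega), if_neg (by decide)]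
  rw [goMax_cons _ 2 (by omega), if_neg (by decide)]
  rw [goMax_cons _ 2 (by omega), if_pos rfl]
  rw [goMax1 (body.length + 1) body [] _ (by omega)]
  cases List.dropWhile (fun c => !(c == ':')) body <;> simp

theorem emitA_eq_emitB (part : List Char) : emitA part = emitB part := by
  unfold emitA emitB
  by_cases hs : PySem.Chars.startswith part "tag:".toList = true
  · rw [if_pos hs, if_pos hs]
    rw [PySem.Chars.startswith_iff] at hs
    obtain ⟨body, rfl⟩ := hs
    rw [show (("tag:".toList : List Char) ++ body) = 't' :: 'a' :: 'g' :: ':' :: body from rfl]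
    rw [show (":".toList : List Char) = [':'] from rfl]
    rw [PySem.Chars.splitMax?, if_neg (by decide), tagSplit]
    rcases hdw : List.dropWhile (fun c => !(c == ':')) body with _ | ⟨hd, tl⟩ <;> simp [hdw]
  · rw [if_neg hs, if_neg hs]

theorem foldlA_eq (parts : List (List Char)) (init : List (List (String × String))) :
    parts.foldl (fun tags part =>
      if PySem.Chars.startswith part "tag:".toList then
        match PySem.Chars.splitMax? part ":".toList 2 with
        | some [_, tag_name, tag_type] =>
            tags ++ [[("name", String.ofList tag_name), ("type", String.ofList tag_type)]]
        | _ => tags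
      else tags) init = init ++ parts.flatMap emitA := by
  induction parts generalizing init with
  | nil => simp
  | cons p ps ih =>
    rw [List.foldl_cons, ih, List.flatMap_cons]
    have hstep : (if PySem.Chars.startswith p "tag:".toList then
        match PySem.Chars.splitMax? p ":".toList 2 with
        | some [_, tag_name, tag_type] =>
            init ++ [[("name", String.ofList tag_name), ("type", String.ofList tag_type)]]
        | _ => init
      else init) = init ++ emitA p := by
      unfold emitA
      split
      · split <;> simp
      · simp
    rw [hstep, List.append_assoc]

theorem altGo_eq (cs : List Char) :
    parse_tags_from_path_py_alt_go cs = (psplit cs).flatMap emitB := by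
  induction cs using parse_tags_from_path_py_alt_go.induct with
  | case1 cs hdrop =>
    rw [parse_tags_from_path_py_alt_go, psplit_unfold, hdrop]
    simp [emitB]
  | case2 cs x rest hdrop ih =>
    rw [parse_tags_from_path_py_alt_go, psplit_unfold, hdrop]
    simp [emitB, ih]

-- ===== VERDICT (by name: the statement is the Claim_ definition above) =====
theorem parse_tags_from_path_py_spec : Claim_equal_parse_tags_from_path_py := by
  intro s _
  unfold Spec_parse_tags_from_path_py parse_tags_from_path_py parse_tags_from_path_py_alt
  rw [show "|".toList = ['|'] from rfl, splitOn_eq_psplit, foldlA_eq, altGo_eq]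
  simp [funext emitA_eq_emitB]
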